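-- pv_equiv track=rewrite | github.com/dgnaw/DemoGit | d14.py | soam_lientiep
-- ===== SOURCE A (Python) =====
-- def soam_lientiep(ds):
--     count = 0
--     min_streak = float('inf')
--     for num in ds:
--         if num < 0:
--             count+=1
--         else:
--             if count > 0:
--                 min_streak = min(min_streak,count)
--             count = 0
--     if count > 0:
--         min_streak = min(min_streak,count)
--     return min_streak if min_streak != float ('inf') else 0
-- ===== SOURCE B (Python) =====
-- def soam_lientiep(ds):
--     bounds = [-1] + [i for i, x in enumerate(ds) if not (x < 0)] + [len(ds)]
--     gaps = [b - a - 1 for a, b in zip(bounds, bounds[1:]) if b - a > 1]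
--     return min(gaps) if gaps else 0
-- ===== Notes on version B (the rewrite author's own statement) =====
-- stated objective: alternative
-- what changed: Replaced the incremental streak counter with a boundary-index method: collect the indices of non-negative elements (with sentinels -1 and len(ds)), turn adjacent-index gaps > 1 into run lengths, and take their min (0 if none).
import Mathlib
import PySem

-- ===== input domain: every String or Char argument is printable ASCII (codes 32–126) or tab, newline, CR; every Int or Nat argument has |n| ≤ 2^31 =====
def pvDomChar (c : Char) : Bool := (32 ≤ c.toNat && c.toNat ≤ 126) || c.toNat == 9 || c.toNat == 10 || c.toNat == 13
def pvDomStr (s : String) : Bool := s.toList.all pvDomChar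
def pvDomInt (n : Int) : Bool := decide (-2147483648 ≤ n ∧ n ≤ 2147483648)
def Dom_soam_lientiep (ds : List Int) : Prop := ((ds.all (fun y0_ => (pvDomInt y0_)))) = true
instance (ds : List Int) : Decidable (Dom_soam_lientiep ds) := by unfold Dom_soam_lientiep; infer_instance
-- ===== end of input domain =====

-- B replaces A's incremental streak counter and post-loop flush by a boundary-index
-- method: indices of non-negative elements with sentinels -1 and len(ds); gaps > 1
-- between adjacent boundaries are the negative run lengths; min of those, 0 if none.

-- ===== PORT A =====
-- min_streak = float('inf') is ported as Option Int with none standing for inf;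
-- min(min_streak, count) with min_streak possibly inf is pyMinInf.
def pyMinInf (ms : Option Int) (c : Int) : Int :=
  match ms with
  | none => c
  | some m => min m c

def soam_lientiep (ds : List Int) : Int :=
  let st := ds.foldl
    (fun (s : Int × Option Int) num =>
      if num < 0 then (s.1 + 1, s.2)
      else (0, if s.1 > 0 then some (pyMinInf s.2 s.1) else s.2))
    (0, none)
  let ms := if st.1 > 0 then some (pyMinInf st.2 st.1) else st.2
  match ms with
  | some m => m
  | none => 0

-- ===== PORT B =====
-- bounds = [-1] + [i for i, x in enumerate(ds) if not (x < 0)] + [len(ds)]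
-- gaps   = [b - a - 1 for a, b in zip(bounds, bounds[1:]) if b - a > 1]
-- return min(gaps) if gaps else 0
def soam_lientiep_alt (ds : List Int) : Int :=
  let bounds : List Int :=
    [-1] ++ (PySem.List.enumerate ds 0).filterMap
      (fun p => if ¬ (p.2 < 0) then some p.1 else none) ++ [(ds.length : Int)]
  let gaps : List Int :=
    (bounds.zip (bounds.drop 1)).filterMap
      (fun p => if p.2 - p.1 > 1 then some (p.2 - p.1 - 1) else none)
  match PySem.List.min? gaps (fun y => y) with
  | some m => m
  | none => 0

-- ===== PRECONDITION & SPEC =====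
def Spec_soam_lientiep (ds : List Int) (out : Int) : Prop := out = soam_lientiep_alt ds
instance (ds : List Int) (out : Int) : Decidable (Spec_soam_lientiep ds out) := by unfold Spec_soam_lientiep; infer_instance

-- ===== CLAIM (what is proved, stated in full; the proofs are below) =====
def Claim_equal_soam_lientiep : Prop := ∀ (ds : List Int), Dom_soam_lientiep ds → Spec_soam_lientiep ds (soam_lientiep ds)

-- ===== LEMMAS AND PROOFS =====

-- proof helpers: pvG c ds = negative-run lengths of ds with a pending run of length c;
-- pvFin finishes A's loop state; pvRes folds pyMinInf over a run list starting from ms;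
-- pvNN j ds = indices (from j) of the non-negative elements; pvGaps = adjacent gaps > 1.
def pvG (c : Int) : List Int → List Int
  | [] => if c > 0 then [c] else []
  | x :: xs => if x < 0 then pvG (c + 1) xs else (if c > 0 then c :: pvG 0 xs else pvG 0 xs)

def pvFin (s : Int × Option Int) : Int :=
  match (if s.1 > 0 then some (pyMinInf s.2 s.1) else s.2) with
  | some m => m
  | none => 0

def pvRes (ms : Option Int) (runs : List Int) : Int :=
  match runs.foldl (fun o r => some (pyMinInf o r)) ms with
  | some m => m
  | none => 0

def pvNN (j : Int) : List Int → List Int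
  | [] => []
  | x :: xs => if x < 0 then pvNN (j + 1) xs else j :: pvNN (j + 1) xs

def pvGaps : List Int → List Int
  | a :: b :: t => (if b - a > 1 then [b - a - 1] else []) ++ pvGaps (b :: t)
  | _ => []

lemma pvKey : ∀ (ds : List Int) (c : Int) (ms : Option Int),
    pvFin (ds.foldl
      (fun (s : Int × Option Int) num =>
        if num < 0 then (s.1 + 1, s.2)
        else (0, if s.1 > 0 then some (pyMinInf s.2 s.1) else s.2)) (c, ms))
      = pvRes ms (pvG c ds) := by
  intro ds
  induction ds with
  | nil =>
    intro c ms
    by_cases hc : c > 0 <;> simp [pvFin, pvG, pvRes, hc]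
  | cons x xs ih =>
    intro c ms
    by_cases hx : x < 0
    · simp only [List.foldl_cons, if_pos hx, pvG]
      exact ih (c + 1) ms
    · by_cases hc : c > 0
      · simp only [List.foldl_cons, if_neg hx, if_pos hc, pvG]
        exact ih 0 (some (pyMinInf ms c))
      · simp only [List.foldl_cons, if_neg hx, if_neg hc, pvG]
        exact ih 0 ms

-- the zip/filterMap formulation of the gap comprehension equals the recursive pvGaps
lemma pvZipGaps_eq : ∀ (l : List Int),
    (l.zip (l.drop 1)).filterMap
      (fun p => if p.2 - p.1 > 1 then some (p.2 - p.1 - 1) else none) = pvGaps l := by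
  intro l
  match l with
  | [] => simp [pvGaps]
  | [a] => simp [pvGaps]
  | a :: b :: t =>
    have ih := pvZipGaps_eq (b :: t)
    simp only [List.drop_one, List.tail_cons, List.zip_cons_cons, List.filterMap_cons] at *
    by_cases h : b - a > 1 <;> simp [pvGaps, h, ih]

-- the enumerate/filterMap formulation of the index comprehension equals pvNN
lemma pvEnumNN_eq : ∀ (ds : List Int) (j : Int),
    (PySem.List.enumerate ds j).filterMap
      (fun p => if ¬ (p.2 < 0) then some p.1 else none) = pvNN j ds := by
  intro ds
  induction ds with
  | nil => intro j; simp [PySem.List.enumerate_nil, pvNN]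
  | cons x xs ih =>
    intro j
    rw [PySem.List.enumerate_cons, List.filterMap_cons]
    by_cases hx : x < 0
    · rw [show (if ¬ ((j, x).2 < 0) then some (j, x).1 else none) = none by simp [hx],
          ih (j + 1)]
      simp [pvNN, hx]
    · rw [show (if ¬ ((j, x).2 < 0) then some (j, x).1 else none) = some j by simp [hx],
          ih (j + 1)]
      simp [pvNN, hx]

-- core: gaps of the boundary list = negative run lengths with pending count j - p - 1
lemma pvGaps_bounds : ∀ (ds : List Int) (p j : Int), p + 1 ≤ j →
    pvGaps (p :: pvNN j ds ++ [j + (ds.length : Int)]) = pvG (j - p - 1) ds := by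
  intro ds
  induction ds with
  | nil =>
    intro p j hpj
    simp only [pvNN, List.length_nil, Int.natCast_zero, add_zero]
    show (if j - p > 1 then [j - p - 1] else []) ++ pvGaps [j] = pvG (j - p - 1) []
    by_cases h : j - p > 1
    · rw [if_pos h]
      simp only [pvGaps, pvG]
      rw [if_pos (by omega : j - p - 1 > 0)]
      simp
    · rw [if_neg h]
      simp only [pvGaps, pvG]
      rw [if_neg (by omega : ¬ (j - p - 1 > 0))]
      simp
  | cons x xs ih =>
    intro p j hpj
    by_cases hx : x < 0
    · have hn : pvNN j (x :: xs) = pvNN (j + 1) xs := by simp [pvNN, hx]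
      have hl : j + ((x :: xs).length : Int) = (j + 1) + (xs.length : Int) := by
        simp [List.length_cons]; ring
      rw [hn, hl, ih p (j + 1) (by omega)]
      have : (j + 1) - p - 1 = (j - p - 1) + 1 := by ring
      rw [this]
      simp [pvG, hx]
    · have hn : pvNN j (x :: xs) = j :: pvNN (j + 1) xs := by simp [pvNN, hx]
      have hl : j + ((x :: xs).length : Int) = (j + 1) + (xs.length : Int) := by
        simp [List.length_cons]; ring
      rw [hn, hl]
      show (if j - p > 1 then [j - p - 1] else []) ++
            pvGaps (j :: pvNN (j + 1) xs ++ [(j + 1) + (xs.length : Int)])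
          = pvG (j - p - 1) (x :: xs)
      rw [ih j (j + 1) (by omega)]
      have h0 : (j + 1) - j - 1 = (0 : Int) := by ring
      rw [h0]
      by_cases hc : j - p - 1 > 0
      · rw [if_pos (by omega : j - p > 1)]
        simp only [pvG, if_neg hx, if_pos hc]
        simp
      · rw [if_neg (by omega : ¬ (j - p > 1))]
        simp only [pvG, if_neg hx, if_neg hc]
        simp

lemma foldl_pyMinInf_some : ∀ (rs : List Int) (a : Int),
    rs.foldl (fun o r => some (pyMinInf o r)) (some a) = some (rs.foldl min a) := by
  intro rs
  induction rs with
  | nil => intro a; simp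
  | cons r rs ih =>
    intro a
    rw [List.foldl_cons, List.foldl_cons]
    exact ih (min a r)

lemma pvRes_none_eq_min? (runs : List Int) :
    pvRes none runs = (match PySem.List.min? runs (fun y => y) with
      | some m => m
      | none => 0) := by
  match runs with
  | [] => simp [pvRes, PySem.List.min?]
  | r :: rs =>
    rw [PySem.List.min?_id_cons]
    show pvRes none (r :: rs) = rs.foldl min r
    unfold pvRes
    rw [List.foldl_cons, show pyMinInf none r = r from rfl, foldl_pyMinInf_some]

-- ===== VERDICT (by name: the statement is the Claim_ definition above) =====
theorem soam_lientiep_spec : Claim_equal_soam_lientiep := by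
  intro ds _
  unfold Spec_soam_lientiep soam_lientiep
  have hA := pvKey ds 0 none
  simp only [pvFin] at hA
  rw [hA]
  have hb : ([(-1 : Int)] ++ (PySem.List.enumerate ds 0).filterMap
        (fun p => if ¬ (p.2 < 0) then some p.1 else none) ++ [(ds.length : Int)])
      = (-1 : Int) :: pvNN 0 ds ++ [(0 : Int) + (ds.length : Int)] := by
    rw [pvEnumNN_eq ds 0]
    simp
  show pvRes none (pvG 0 ds) =
    (match PySem.List.min?
      ((([(-1 : Int)] ++ (PySem.List.enumerate ds 0).filterMap
          (fun p => if ¬ (p.2 < 0) then some p.1 else none) ++ [(ds.length : Int)]).zip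
        (([(-1 : Int)] ++ (PySem.List.enumerate ds 0).filterMap
          (fun p => if ¬ (p.2 < 0) then some p.1 else none) ++ [(ds.length : Int)]).drop 1)).filterMap
        (fun p => if p.2 - p.1 > 1 then some (p.2 - p.1 - 1) else none))
      (fun y => y) with
    | some m => m
    | none => 0)
  rw [pvZipGaps_eq, hb, pvGaps_bounds ds (-1) 0 (by omega)]
  have h0 : (0 : Int) - (-1) - 1 = 0 := by ring
  rw [h0, pvRes_none_eq_min?]
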